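-- pv_equiv track=rewrite | github.com/szge/foobar | c2_2.py | solution
-- ===== SOURCE A (Python) =====
-- def solution(s):
--     l = s.count("<")
--     salutes = 0
--     for char in s:
--         if char == ">":
--             salutes += l
--         elif char == "<":
--             if l == 0: break
--             l -= 1
--     return salutes * 2
-- ===== SOURCE B (Python) =====
-- def solution(s):
--     seen = 0
--     acc = 0
--     for ch in s:
--         if ch == ">":
--             seen += 1
--         elif ch == "<":
--             acc += seen
--     return 2 * acc
-- ===== Notes on version B (the rewrite author's own statement) =====
-- stated objective: simpler
-- what changed: B counts, for each '<', the '>' characters before it with a running prefix counter (transpose of A's suffix counting), removing A's separate s.count('<') pre-pass and its dead l==0 break branch.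
import Mathlib
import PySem

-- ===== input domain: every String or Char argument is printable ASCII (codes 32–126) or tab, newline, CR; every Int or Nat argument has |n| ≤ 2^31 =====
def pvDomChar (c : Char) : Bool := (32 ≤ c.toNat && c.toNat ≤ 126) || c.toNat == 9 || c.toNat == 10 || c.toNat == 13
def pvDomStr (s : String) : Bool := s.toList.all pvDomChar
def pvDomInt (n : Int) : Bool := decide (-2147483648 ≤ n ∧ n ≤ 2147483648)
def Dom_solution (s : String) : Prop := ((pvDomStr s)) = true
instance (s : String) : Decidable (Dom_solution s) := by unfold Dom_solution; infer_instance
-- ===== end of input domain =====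

-- B counts, for each '<', the '>' before it with a running prefix counter (transpose of A's
-- suffix counting), dropping A's separate count pre-pass and its unreachable break branch.

-- ===== PORT A =====
-- the for-loop with its break, as structural recursion over the remaining characters
def solLoopA : List Char → Int → Int → Int
  | [], _, sal => sal
  | c :: rest, l, sal =>
    if c = '>' then solLoopA rest l (sal + l)
    else if c = '<' then
      if l = 0 then sal          -- break: return current salutes
      else solLoopA rest (l - 1) sal
    else solLoopA rest l sal

def solution (s : String) : Int :=
  solLoopA s.toList ((PySem.Str.count s "<" : Int)) 0 * 2

-- ===== PORT B =====
def solution_alt (s : String) : Int :=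
  2 * (s.toList.foldl
    (fun (st : Int × Int) c =>
      if c = '>' then (st.1 + 1, st.2)
      else if c = '<' then (st.1, st.2 + st.1)
      else st) (0, 0)).2

-- ===== PRECONDITION & SPEC =====
def Spec_solution (s : String) (out : Int) : Prop := out = solution_alt s
instance (s : String) (out : Int) : Decidable (Spec_solution s out) := by unfold Spec_solution; infer_instance

-- ===== CLAIM (what is proved, stated in full; the proofs are below) =====
def Claim_equal_solution : Prop := ∀ (s : String), Dom_solution s → Spec_solution s (solution s)

-- ===== LEMMAS AND PROOFS =====

-- number of ('>','<') pairs with the '>' strictly before the '<'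
def pairsGL : List Char → Int
  | [] => 0
  | c :: r => (if c = '>' then (r.count '<' : Int) else 0) + pairsGL r

-- Python's str.count for the single-character needle "<" is plain character counting
theorem countGo_singleton (l : List Char) : ∀ (fuel acc : Nat), l.length ≤ fuel →
    PySem.Chars.count.go ['<'] fuel l acc = acc + l.count '<' := by
  induction l with
  | nil => intro fuel acc _; cases fuel <;> simp [PySem.Chars.count.go]
  | cons c r ih =>
    intro fuel acc h
    cases fuel with
    | zero => simp at h
    | succ f =>
      simp only [List.length_cons, Nat.add_le_add_iff_right] at h
      by_cases hc : c = '<'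
      · subst hc
        simp [PySem.Chars.count.go, List.isPrefixOf, ih f (acc + 1) h]
        omega
      · have : (['<'].isPrefixOf (c :: r)) = false := by
          simp [List.isPrefixOf]; exact fun h' => hc (h'.symm ▸ rfl)
        simp [PySem.Chars.count.go, this, ih f acc h, hc]

theorem strCount_lt (s : String) : PySem.Str.count s "<" = s.toList.count '<' := by
  have h := countGo_singleton s.toList s.length 0 (by simp)
  rw [PySem.Str.count_eq]
  show PySem.Chars.count s.toList ['<'] = _
  simp [PySem.Chars.count, h]

-- A's loop, started with l = number of '<' remaining, sums for each '>' the '<' after it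
theorem solLoopA_eq (cs : List Char) : ∀ (sal : Int),
    solLoopA cs (cs.count '<' : Int) sal = sal + pairsGL cs := by
  induction cs with
  | nil => intro sal; simp [solLoopA, pairsGL]
  | cons c r ih =>
    intro sal
    by_cases hgt : c = '>'
    · subst hgt
      simp [solLoopA, pairsGL, ih]
      ring
    · by_cases hlt : c = '<'
      · subst hlt
        have hc : ((('<' :: r).count '<' : Nat) : Int) = (r.count '<' : Int) + 1 := by
          simp
        have hp : pairsGL ('<' :: r) = pairsGL r := by simp [pairsGL]
        have hnz : ¬ ((r.count '<' : Int) + 1 = 0) := by omega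
        simp [solLoopA, hp, hnz, add_sub_cancel_right, ih]
      · simp [solLoopA, hgt, hlt, ih, pairsGL]

-- B's fold: final acc = acc + seen · (#'<' in cs) + pairsGL cs
theorem foldB_eq (cs : List Char) : ∀ (seen acc : Int),
    (cs.foldl (fun (st : Int × Int) c =>
      if c = '>' then (st.1 + 1, st.2)
      else if c = '<' then (st.1, st.2 + st.1)
      else st) (seen, acc)).2 = acc + seen * (cs.count '<' : Int) + pairsGL cs := by
  induction cs with
  | nil => intro seen acc; simp [pairsGL]
  | cons c r ih =>
    intro seen acc
    by_cases hgt : c = '>'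
    · subst hgt
      simp only [List.foldl_cons, ih, pairsGL, List.count_cons]
      norm_num; ring
    · by_cases hlt : c = '<'
      · subst hlt
        simp only [List.foldl_cons, if_neg (by decide : ¬ ('<' = '>')), ih,
          pairsGL, List.count_cons]
        norm_num; ring
      · simp only [List.foldl_cons, ih, pairsGL,
          List.count_cons, hgt, hlt]
        simp [hlt]

-- ===== VERDICT (by name: the statement is the Claim_ definition above) =====
theorem solution_spec : Claim_equal_solution := by
  intro s _
  unfold Spec_solution solution solution_alt
  rw [strCount_lt, solLoopA_eq, foldB_eq]
  ring
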